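-- pv_equiv track=rewrite | github.com/RadNuke101/OpenAI_Tests | results_lists/39060015/39060015.sl.20240314180040.py | delete_enclosed_text
-- ===== SOURCE A (Python) =====
-- def delete_enclosed_text(input_list):
--     output = []
--     for item in input_list:
--         new_item = item[0]
--         while '/' in new_item:
--             start_index = new_item.index('/')
--             end_index = new_item.index('/', start_index + 1)
--             new_item = new_item[:start_index] + new_item[end_index + 1:]
--         output.append(new_item)
--     return output
-- ===== SOURCE B (Python) =====
-- def delete_enclosed_text(input_list):
--     output = []
--     for item in input_list:
--         s = item[0]
--         buf = []
--         inside = False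
--         for ch in s:
--             if ch == '/':
--                 inside = not inside
--             elif not inside:
--                 buf.append(ch)
--         if inside:
--             raise ValueError('unmatched slash')
--         output.append(''.join(buf))
--     return output
-- ===== Notes on version B (the rewrite author's own statement) =====
-- stated objective: alternative
-- what changed: replace the repeated index/index/splice loop per string with a single left-to-right pass that toggles an inside/outside flag at each slash and keeps only outside characters
import Mathlib
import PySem

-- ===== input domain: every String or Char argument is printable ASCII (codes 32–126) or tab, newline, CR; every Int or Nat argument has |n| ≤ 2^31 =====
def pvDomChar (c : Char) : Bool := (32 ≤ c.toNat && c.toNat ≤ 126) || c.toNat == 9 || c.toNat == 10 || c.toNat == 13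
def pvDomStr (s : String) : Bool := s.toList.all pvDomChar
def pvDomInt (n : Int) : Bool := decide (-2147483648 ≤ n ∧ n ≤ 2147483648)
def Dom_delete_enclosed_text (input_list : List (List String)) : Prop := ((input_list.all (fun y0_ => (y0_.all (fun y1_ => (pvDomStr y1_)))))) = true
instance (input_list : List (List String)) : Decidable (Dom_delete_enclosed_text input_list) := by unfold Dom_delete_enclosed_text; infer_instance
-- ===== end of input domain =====

-- B replaces A's repeated index/index/splice inner loop by a single pass per string that
-- toggles an inside/outside flag at each '/' and keeps only outside characters (objective: alternative single-pass algorithm).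

-- ===== PORT A =====
-- A's inner `while '/' in new_item` loop: find the first '/', find the next '/' after it,
-- splice both out together with the text between them.  `new_item.index('/', start+1)`
-- is ported as index? on the drop, giving the absolute position i+1+k.
-- The `none` branch of the second search is Python's ValueError (excluded by Pre_).
def pvStripLoopA (s : List Char) : List Char :=
  match h1 : PySem.List.index? s '/' with
  | none => s
  | some i =>
    match PySem.List.index? (s.drop (i + 1)) '/' with
    | none => s
    | some k => pvStripLoopA (s.take i ++ s.drop (i + 1 + k + 1))
termination_by s.length
decreasing_by
  obtain ⟨hk, -, -⟩ := PySem.List.getElem_of_index?_eq_some h1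
  simp only [List.length_append, List.length_take, List.length_drop]
  omega

-- `item[0]` raises IndexError on an empty item (excluded by Pre_); headD "" is exact on nonempty items
def delete_enclosed_text (input_list : List (List String)) : List String :=
  input_list.foldl (fun output item =>
    output ++ [String.mk (pvStripLoopA (item.headD "").toList)]) []

-- ===== PORT B =====
-- Source B's single pass: state (inside, buf); '/' toggles, outside chars are appended to buf.
-- Its trailing `raise ValueError` when inside is left set is excluded by Pre_.
def pvTogglePassB (s : List Char) (inside : Bool) (buf : List Char) : Bool × List Char :=
  match s with
  | [] => (inside, buf)
  | c :: cs =>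
    if c = '/' then pvTogglePassB cs (!inside) buf
    else if inside then pvTogglePassB cs inside buf
    else pvTogglePassB cs inside (buf ++ [c])

def delete_enclosed_text_alt (input_list : List (List String)) : List String :=
  input_list.foldl (fun output item =>
    output ++ [String.mk (pvTogglePassB (item.headD "").toList false []).2]) []

-- ===== PRECONDITION & SPEC =====
-- Pre_ excludes exactly the inputs on which A raises: an empty inner list (IndexError on
-- item[0]) and a first string with an odd number of '/' (ValueError from the second index()).
def Pre_delete_enclosed_text (input_list : List (List String)) : Prop :=
  ∀ item ∈ input_list, item ≠ [] ∧ (item.headD "").toList.count '/' % 2 = 0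
instance (input_list : List (List String)) : Decidable (Pre_delete_enclosed_text input_list) := by unfold Pre_delete_enclosed_text; infer_instance

def pvWitness_delete_enclosed_text : List (List String) := [["a/bc/d e", "x"], ["no slash"], ["//q// r"]]

def Spec_delete_enclosed_text (input_list : List (List String)) (out : List String) : Prop := out = delete_enclosed_text_alt input_list
instance (input_list : List (List String)) (out : List String) : Decidable (Spec_delete_enclosed_text input_list out) := by unfold Spec_delete_enclosed_text; infer_instance

-- ===== CLAIM (what is proved, stated in full; the proofs are below) =====
def Claim_equal_delete_enclosed_text : Prop := ∀ (input_list : List (List String)), Dom_delete_enclosed_text input_list → Pre_delete_enclosed_text input_list → Spec_delete_enclosed_text input_list (delete_enclosed_text input_list)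

-- ===== LEMMAS AND PROOFS =====

-- clean recursive description of B's pass (buf-free)
def pvTg : List Char → Bool → List Char
  | [], _ => []
  | c :: cs, inside =>
    if c = '/' then pvTg cs (!inside)
    else if inside then pvTg cs inside
    else c :: pvTg cs inside

theorem pvTogglePassB_snd (s : List Char) : ∀ (inside : Bool) (buf : List Char),
    (pvTogglePassB s inside buf).2 = buf ++ pvTg s inside := by
  induction s with
  | nil => intro inside buf; simp [pvTogglePassB, pvTg]
  | cons c cs ih =>
    intro inside buf
    by_cases hc : c = '/'
    · simp [pvTogglePassB, pvTg, hc, ih]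
    · cases inside <;> simp [pvTogglePassB, pvTg, hc, ih]

theorem pvTg_no_slash (a : List Char) (ha : '/' ∉ a) (ins : Bool) :
    pvTg a ins = if ins then [] else a := by
  induction a with
  | nil => cases ins <;> simp [pvTg]
  | cons c cs ih =>
    have hc : c ≠ '/' := fun h => ha (h ▸ List.mem_cons_self)
    have hcs : '/' ∉ cs := fun h => ha (List.mem_cons_of_mem _ h)
    cases ins <;> simp [pvTg, hc, ih hcs]

theorem pvTg_append_no_slash (a s : List Char) (ha : '/' ∉ a) (ins : Bool) :
    pvTg (a ++ s) ins = (if ins then [] else a) ++ pvTg s ins := by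
  induction a with
  | nil => simp
  | cons c cs ih =>
    have hc : c ≠ '/' := fun h => ha (h ▸ List.mem_cons_self)
    have hcs : '/' ∉ cs := fun h => ha (List.mem_cons_of_mem _ h)
    cases ins <;> simp [pvTg, hc, ih hcs]

theorem pvTg_slash (cs : List Char) (ins : Bool) : pvTg ('/' :: cs) ins = pvTg cs (!ins) := by
  simp [pvTg]

-- key lemma: on strings with an even number of '/', A's splice loop equals B's toggle pass
theorem pvStrip_eq_tg (s : List Char) (hev : s.count '/' % 2 = 0) :
    pvStripLoopA s = pvTg s false := by
  induction hn : s.length using Nat.strong_induction_on generalizing s with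
  | _ n ih =>
  match h1 : PySem.List.index? s '/' with
  | none =>
    have hna : '/' ∉ s := (PySem.List.index?_eq_none_iff _ _).1 h1
    rw [pvStripLoopA, h1, pvTg_no_slash s hna false]
    simp
  | some i =>
    obtain ⟨pre, suf, hs, hlen, hpre⟩ := (PySem.List.index?_eq_some_iff _ _ _).1 h1
    have hsplit : s = (pre ++ ['/']) ++ suf := by simp [hs]
    have hdrop : s.drop (i + 1) = suf := by
      rw [hsplit, ← hlen, show pre.length + 1 = (pre ++ ['/']).length by simp]
      exact List.drop_left
    have hcsuf : suf.count '/' % 2 = 1 := by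
      have h0 := hev
      rw [hs, List.count_append, List.count_cons_self] at h0
      have hp : pre.count '/' = 0 := List.count_eq_zero_of_not_mem hpre
      omega
    have hmem : '/' ∈ suf := by
      by_contra hnm
      rw [List.count_eq_zero_of_not_mem hnm] at hcsuf; omega
    match h2 : PySem.List.index? (s.drop (i + 1)) '/' with
    | none =>
      exact absurd (hdrop ▸ (PySem.List.index?_eq_none_iff _ _).1 h2) (fun h => h hmem)
    | some k =>
      obtain ⟨pre2, suf2, hs2, hlen2, hpre2⟩ := (PySem.List.index?_eq_some_iff _ _ _).1 (hdrop ▸ h2)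
      have htake : s.take i = pre := by
        rw [hs, ← hlen]; exact List.take_left
      have hdrop2 : s.drop (i + 1 + k + 1) = suf2 := by
        have hstep : s.drop (i + 1 + k + 1) = (s.drop (i + 1)).drop (k + 1) := by
          rw [List.drop_drop]; ring_nf
        rw [hstep, hdrop, hs2, ← hlen2,
            show pre2 ++ '/' :: suf2 = (pre2 ++ ['/']) ++ suf2 by simp,
            show pre2.length + 1 = (pre2 ++ ['/']).length by simp]
        exact List.drop_left
      have hunf : pvStripLoopA s = pvStripLoopA (s.take i ++ s.drop (i + 1 + k + 1)) := by
        rw [pvStripLoopA]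
        split
        · next heq => rw [heq] at h1; exact absurd h1 (by simp)
        · next i' heq =>
          rw [heq] at h1
          injection h1 with hi
          subst hi
          split
          · next heq2 => rw [heq2] at h2; exact absurd h2 (by simp)
          · next k' heq2 =>
            rw [heq2] at h2
            injection h2 with hk
            subst hk
            rfl
      have hev' : (pre ++ suf2).count '/' % 2 = 0 := by
        have h0 := hev
        rw [hs, hs2] at h0
        simp only [List.count_append, List.count_cons_self] at h0
        rw [List.count_append]
        have hp : pre.count '/' = 0 := List.count_eq_zero_of_not_mem hpre
        have hp2 : pre2.count '/' = 0 := List.count_eq_zero_of_not_mem hpre2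
        omega
      have hlt : (pre ++ suf2).length < n := by
        rw [← hn, hs, hs2]
        simp only [List.length_append, List.length_cons]
        omega
      rw [hunf, htake, hdrop2, ih _ hlt _ hev' rfl]
      have hrhs : pvTg s false = pre ++ pvTg suf2 false := by
        rw [hs, hs2, pvTg_append_no_slash _ _ hpre, pvTg_slash,
            pvTg_append_no_slash _ _ hpre2, pvTg_slash]
        simp
      rw [hrhs, pvTg_append_no_slash _ _ hpre]
      simp

-- ===== VERDICT (by name: the statement is the Claim_ definition above) =====
theorem delete_enclosed_text_spec : Claim_equal_delete_enclosed_text := by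
  unfold Claim_equal_delete_enclosed_text
  intro input_list _ hpre
  unfold Spec_delete_enclosed_text delete_enclosed_text delete_enclosed_text_alt
  refine PySem.List.foldl_congr_mem' _ _ _ _ ?_
  intro item hitem acc
  have hh := (hpre item hitem).2
  rw [pvStrip_eq_tg _ hh, pvTogglePassB_snd, List.nil_append]
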